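-- pv_equiv track=rewrite | github.com/MrBrantCode/unitest_baseline | mut_generate/mist_train_cf/cf_54261/solution.py | find_shortest_sentence
-- ===== SOURCE A (Python) =====
-- def find_shortest_sentence(sentences):
--     """
--     This function takes an array of sentences as input and returns the shortest sentence.
--
--     Parameters:
--     sentences (list): A list of strings representing the sentences.
--
--     Returns:
--     str: The shortest sentence in the input list.
--     """
--     if not sentences:
--         return ""
--
--     min_length = len(sentences[0])
--     min_sentence = sentences[0]
--
--     for sentence in sentences:
--         if len(sentence) < min_length:
--             min_length = len(sentence)
--             min_sentence = sentence
--
--     return min_sentence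
-- ===== SOURCE B (Python) =====
-- def find_shortest_sentence(sentences):
--     """Return the shortest sentence (first one on ties) via a stable sort by length."""
--     if not sentences:
--         return ""
--     return sorted(sentences, key=len)[0]
-- ===== Notes on version B (the rewrite author's own statement) =====
-- stated objective: alternative
-- what changed: Replaces the manual min-tracking scan with a stable sort by length followed by taking the first element; ties resolve to the same first minimum by sort stability.
import Mathlib
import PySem

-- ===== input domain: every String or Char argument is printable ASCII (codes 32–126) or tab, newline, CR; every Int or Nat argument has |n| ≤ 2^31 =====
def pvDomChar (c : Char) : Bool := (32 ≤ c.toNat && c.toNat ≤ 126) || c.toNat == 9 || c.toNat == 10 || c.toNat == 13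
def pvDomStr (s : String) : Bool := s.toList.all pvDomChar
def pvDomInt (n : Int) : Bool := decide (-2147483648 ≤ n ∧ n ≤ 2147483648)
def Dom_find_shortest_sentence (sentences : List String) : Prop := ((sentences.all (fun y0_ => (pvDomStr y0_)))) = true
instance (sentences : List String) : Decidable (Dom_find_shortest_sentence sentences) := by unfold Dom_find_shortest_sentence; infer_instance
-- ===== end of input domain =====

-- B replaces A's manual min-tracking scan with a stable sort by length and takes the first element (alternative decomposition, not faster).


-- ===== PORT A =====
def find_shortest_sentence (sentences : List String) : String :=
  match sentences with
  | [] => ""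
  | s0 :: _ =>
    -- min_length, min_sentence start at sentences[0]; the loop scans the whole list
    let r := sentences.foldl
      (fun (st : Int × String) sentence =>
        if PySem.Str.len sentence < st.1 then (PySem.Str.len sentence, sentence) else st)
      (PySem.Str.len s0, s0)
    r.2

-- ===== PORT B =====
def find_shortest_sentence_alt (sentences : List String) : String :=
  match sentences with
  | [] => ""
  | _ :: _ => (PySem.List.sorted sentences (fun s => PySem.Str.len s)).headD ""

-- ===== PRECONDITION & SPEC =====
def Spec_find_shortest_sentence (sentences : List String) (out : String) : Prop := out = find_shortest_sentence_alt sentences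
instance (sentences : List String) (out : String) : Decidable (Spec_find_shortest_sentence sentences out) := by unfold Spec_find_shortest_sentence; infer_instance

-- ===== CLAIM (what is proved, stated in full; the proofs are below) =====
def Claim_equal_find_shortest_sentence : Prop := ∀ (sentences : List String), Dom_find_shortest_sentence sentences → Spec_find_shortest_sentence sentences (find_shortest_sentence sentences)

-- ===== LEMMAS AND PROOFS =====

-- first-minimum-by-length accumulator both proofs reduce to
def pvG (m s : String) : String := if PySem.Str.len s < PySem.Str.len m then s else m

theorem pv_foldl_pair (l : List String) (m : String) :
    l.foldl (fun (st : Int × String) s =>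
        if PySem.Str.len s < st.1 then (PySem.Str.len s, s) else st)
      (PySem.Str.len m, m)
    = (PySem.Str.len (l.foldl pvG m), l.foldl pvG m) := by
  induction l generalizing m with
  | nil => rfl
  | cons x t ih =>
    simp only [List.foldl_cons, pvG]
    by_cases h : PySem.Str.len x < PySem.Str.len m
    · simp only [h, if_true, ih]
    · simp only [h, if_false, ih]

theorem pv_insertBy_ne_nil (bf : String → String → Bool) (x : String) (ys : List String) :
    PySem.List.insertBy bf x ys ≠ [] := by
  cases ys with
  | nil => simp [PySem.List.insertBy]
  | cons y t =>
    simp only [PySem.List.insertBy]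
    split <;> simp

theorem pv_head_foldl_insertBy (l : List String) (acc : List String) (hacc : acc ≠ []) :
    ((l.foldl (fun a s =>
        PySem.List.insertBy (fun a b => decide (PySem.Str.len a < PySem.Str.len b)) s a) acc).headD "")
    = l.foldl pvG (acc.headD "") := by
  induction l generalizing acc with
  | nil => rfl
  | cons x t ih =>
    simp only [List.foldl_cons]
    rw [ih _ (pv_insertBy_ne_nil _ _ _)]
    congr 1
    cases acc with
    | nil => exact absurd rfl hacc
    | cons y ys =>
      simp only [PySem.List.insertBy, List.headD_cons, pvG]
      split <;> simp_all

-- ===== VERDICT (by name: the statement is the Claim_ definition above) =====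
theorem find_shortest_sentence_spec : Claim_equal_find_shortest_sentence := by
  intro sentences _
  unfold Spec_find_shortest_sentence find_shortest_sentence find_shortest_sentence_alt
  cases sentences with
  | nil => rfl
  | cons x l =>
    simp only [List.foldl_cons, if_neg (lt_irrefl (PySem.Str.len x)), pv_foldl_pair,
      PySem.List.sorted_eq_foldl_insertBy]
    have hx : PySem.List.insertBy (fun a b => decide (PySem.Str.len a < PySem.Str.len b)) x []
        = [x] := rfl
    rw [hx, pv_head_foldl_insertBy l [x] (by simp)]
    rfl
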